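-- pv_equiv track=rewrite | github.com/Pandaemonium/CausalOctonionGraph | cog_v3/python/orbit_loops_v5.py | detect_period
-- ===== SOURCE A (Python) =====
-- from typing import Dict, List, Optional, Tuple
--
-- def detect_period(keys: List[Tuple[int, int, int, int, int]]) -> Tuple[Optional[int], Optional[int]]:
--     """Return (period, first_repeat_index) if a stable period is detected."""
--     seen: Dict[Tuple[int, int, int, int, int], int] = {}
--     for i, k in enumerate(keys):
--         if k in seen:
--             j = seen[k]
--             p = i - j
--             if p <= 0:
--                 continue
--             ok = True
--             for t in range(i, len(keys)):
--                 if keys[t] != keys[j + ((t - j) % p)]: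
--                     ok = False
--                     break
--             if ok:
--                 return p, i
--         else:
--             seen[k] = i
--     return None, None
-- ===== SOURCE B (Python) =====
-- def detect_period(keys):
--     """Return (period, first_repeat_index) if a stable period is detected."""
--     n = len(keys)
--     r = keys[::-1]
--     # Z-array of the reversed sequence (Z-algorithm): z[p] = lcp of r and r[p:]
--     z = [0] * n
--     if n:
--         z[0] = n
--     l = rr = 0
--     for p in range(1, n):
--         g = min(rr - p, z[p - l]) if p < rr else 0
--         while p + g < n and r[g] == r[p + g]:
--             g += 1
--         z[p] = g
--         if p + g > rr:
--             l, rr = p, p + g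
--     first = {}
--     for i, k in enumerate(keys):
--         if k in first:
--             p = i - first[k]
--             # suffix keys[i:] is p-periodic from its first repeat iff the reversed
--             # sequence matches itself shifted by p for at least n - i elements
--             if z[p] >= n - i:
--                 return p, i
--         else:
--             first[k] = i
--     return None, None
-- ===== Notes on version B (the rewrite author's own statement) =====
-- stated objective: alternative
-- what changed: B precomputes a Z-array of the reversed sequence (Z-algorithm) so each repeat's suffix-periodicity test becomes a single table lookup z[p] >= n-i instead of A's per-repeat modular-index verification loop; it trades A's worst-case quadratic rescanning for a fixed linear precomputation pass (not measurably faster on the timed inputs, where A returns after one check).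
import Mathlib
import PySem

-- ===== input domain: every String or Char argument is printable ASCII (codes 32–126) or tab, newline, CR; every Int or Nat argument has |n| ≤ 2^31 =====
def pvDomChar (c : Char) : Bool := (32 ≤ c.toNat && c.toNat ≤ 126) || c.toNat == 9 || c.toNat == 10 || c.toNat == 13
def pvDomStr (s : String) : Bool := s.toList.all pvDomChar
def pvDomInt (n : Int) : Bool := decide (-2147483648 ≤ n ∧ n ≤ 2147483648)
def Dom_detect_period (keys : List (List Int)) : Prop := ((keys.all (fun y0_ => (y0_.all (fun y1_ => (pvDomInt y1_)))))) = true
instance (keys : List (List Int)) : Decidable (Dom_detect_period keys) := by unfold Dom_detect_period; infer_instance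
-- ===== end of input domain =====

-- B replaces A's per-repeat modular verification loop by a Z-array of the reversed
-- sequence (Z-algorithm), so each repeat's periodicity test is one table lookup
-- (a different algorithm; not measured faster on the timed inputs).

-- ===== PORT A =====
-- inner loop 'for t in range(i, len(keys)): … ok = False; break' as structural recursion over the range list
def pvACheck (keys : List (List Int)) (j p : Int) : List Int → Bool
  | [] => true
  | t :: ts =>
    if PySem.List.pyGetD keys t [] ≠ PySem.List.pyGetD keys (j + PySem.Int.mod (t - j) p) [] then false
    else pvACheck keys j p ts

-- outer 'for i, k in enumerate(keys)' with dict 'seen' and early return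
def pvALoop (keys : List (List Int)) : List (Int × List Int) → PySem.Dict (List Int) Int → Option Int × Option Int
  | [], _ => (none, none)
  | (i, k) :: rest, seen =>
    match seen.get? k with
    | some j =>
        let p := i - j
        if p ≤ 0 then pvALoop keys rest seen
        else if pvACheck keys j p (PySem.List.pyRange i (keys.length : Int) 1) then (some p, some i)
        else pvALoop keys rest seen
    | none => pvALoop keys rest (seen.insert k i)

def detect_period (keys : List (List Int)) : Option Int × Option Int :=
  pvALoop keys (PySem.List.enumerate keys 0) PySem.Dict.empty

-- ===== PORT B =====
-- 'while p + g < n and r[g] == r[p + g]: g += 1'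
def pvExt (r : List (List Int)) (n p g : Nat) : Nat :=
  if h : p + g < n ∧ r.getD g [] = r.getD (p + g) [] then pvExt r n p (g + 1) else g
  termination_by n - (p + g)
  decreasing_by obtain ⟨h1, _⟩ := h; omega

-- one iteration of 'for p in range(1, n)' over the state (z, l, rr)
def pvZStep (r : List (List Int)) (n : Nat) (st : List Nat × Nat × Nat) (p : Nat) : List Nat × Nat × Nat :=
  let g0 := if p < st.2.2 then min (st.2.2 - p) (st.1.getD (p - st.2.1) 0) else 0
  let g := pvExt r n p g0
  let z' := st.1.set p g
  if p + g > st.2.2 then (z', p, p + g) else (z', st.2.1, st.2.2)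

-- 'z = [0]*n; if n: z[0] = n' then the Z loop
def pvZArr (r : List (List Int)) (n : Nat) : List Nat :=
  if n = 0 then [] else
    ((List.range' 1 (n - 1)).foldl (pvZStep r n) ((List.replicate n 0).set 0 n, 0, 0)).1

-- second loop: dict of first occurrences, O(1) test 'z[p] >= n - i'
def pvBScan (n : Int) (z : List Nat) :
    List (Int × List Int) → PySem.Dict (List Int) Int → Option Int × Option Int
  | [], _ => (none, none)
  | (i, k) :: rest, first =>
    match first.get? k with
    | some j =>
        if ((z.getD (i - j).toNat 0 : Int) ≥ n - i) then (some (i - j), some i)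
        else pvBScan n z rest first
    | none => pvBScan n z rest (first.insert k i)

def detect_period_alt (keys : List (List Int)) : Option Int × Option Int :=
  let n := keys.length
  let r := keys.reverse
  pvBScan (n : Int) (pvZArr r n) (PySem.List.enumerate keys 0) PySem.Dict.empty

-- ===== PRECONDITION & SPEC =====
def Spec_detect_period (keys : List (List Int)) (out : Option Int × Option Int) : Prop := out = detect_period_alt keys
instance (keys : List (List Int)) (out : Option Int × Option Int) : Decidable (Spec_detect_period keys out) := by unfold Spec_detect_period; infer_instance

-- ===== CLAIM (what is proved, stated in full; the proofs are below) =====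
def Claim_equal_detect_period : Prop := ∀ (keys : List (List Int)), Dom_detect_period keys → Spec_detect_period keys (detect_period keys)

-- ===== LEMMAS AND PROOFS =====

-- longest common prefix length: the specification the Z-array computes
def pvLcp : List (List Int) → List (List Int) → Nat
  | x :: xs, y :: ys => if x = y then pvLcp xs ys + 1 else 0
  | _, _ => 0

theorem pvLcp_le_right (xs ys : List (List Int)) : pvLcp xs ys ≤ ys.length := by
  induction xs generalizing ys with
  | nil => simp [pvLcp]
  | cons x xs ih =>
    cases ys with
    | nil => simp [pvLcp]
    | cons y ys =>
      simp only [pvLcp]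
      split_ifs
      · simpa using ih ys
      · simp

theorem pvLcp_match (xs ys : List (List Int)) (u : Nat) (hu : u < pvLcp xs ys) :
    xs.getD u [] = ys.getD u [] := by
  induction xs generalizing ys u with
  | nil => simp [pvLcp] at hu
  | cons x xs ih =>
    cases ys with
    | nil => simp [pvLcp] at hu
    | cons y ys =>
      simp only [pvLcp] at hu
      split_ifs at hu with hxy
      · cases u with
        | zero => simpa using hxy
        | succ u => simpa using ih ys u (by omega)
      · omega

theorem pvLcp_stop (xs ys : List (List Int)) (h1 : pvLcp xs ys < xs.length)
    (h2 : pvLcp xs ys < ys.length) :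
    xs.getD (pvLcp xs ys) [] ≠ ys.getD (pvLcp xs ys) [] := by
  induction xs generalizing ys with
  | nil => simp [pvLcp] at h1
  | cons x xs ih =>
    cases ys with
    | nil => simp [pvLcp] at h2
    | cons y ys =>
      by_cases hxy : x = y
      · simp only [pvLcp, if_pos hxy, List.length_cons] at h1 h2
        simp only [pvLcp, if_pos hxy, List.getD_cons_succ]
        exact ih ys (by omega) (by omega)
      · simp only [pvLcp, if_neg hxy, List.getD_cons_zero]
        exact hxy

theorem pvLcp_ge (xs ys : List (List Int)) (m : Nat) (h1 : m ≤ xs.length) (h2 : m ≤ ys.length)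
    (h : ∀ u, u < m → xs.getD u [] = ys.getD u []) : m ≤ pvLcp xs ys := by
  induction xs generalizing ys m with
  | nil => simp at h1; omega
  | cons x xs ih =>
    cases ys with
    | nil => simp at h2; omega
    | cons y ys =>
      cases m with
      | zero => omega
      | succ m =>
        have hxy : x = y := by simpa using h 0 (by omega)
        simp only [pvLcp, if_pos hxy]
        have := ih ys m (by simpa using h1) (by simpa using h2)
          (fun u hu => by simpa using h (u + 1) (by omega))
        omega

theorem pvGetD_drop (r : List (List Int)) (p u : Nat) :
    (r.drop p).getD u [] = r.getD (p + u) [] := by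
  simp [List.getD_eq_getElem?_getD, List.getElem?_drop]

-- the while loop extends a correct lower bound to the exact lcp
theorem pvExt_eq_aux (r : List (List Int)) (p : Nat) :
    ∀ d g, g ≤ pvLcp r (r.drop p) → pvLcp r (r.drop p) - g ≤ d →
      pvExt r r.length p g = pvLcp r (r.drop p) := by
  intro d
  induction d with
  | zero =>
    intro g hg hd
    have hge : g = pvLcp r (r.drop p) := by omega
    subst hge
    rw [pvExt]
    rw [dif_neg]
    intro ⟨hlt, heq⟩
    have hlen : pvLcp r (r.drop p) < (r.drop p).length := by
      rw [List.length_drop]; omega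
    exact pvLcp_stop r (r.drop p) (by omega) hlen (by rw [heq, pvGetD_drop])
  | succ d ih =>
    intro g hg hd
    by_cases hgm : g = pvLcp r (r.drop p)
    · subst hgm
      rw [pvExt, dif_neg]
      intro ⟨hlt, heq⟩
      have hlen : pvLcp r (r.drop p) < (r.drop p).length := by
        rw [List.length_drop]; omega
      exact pvLcp_stop r (r.drop p) (by omega) hlen (by rw [heq, pvGetD_drop])
    · have hglt : g < pvLcp r (r.drop p) := by omega
      have hlen : pvLcp r (r.drop p) ≤ (r.drop p).length := pvLcp_le_right _ _
      rw [List.length_drop] at hlen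
      have hmatch := pvLcp_match r (r.drop p) g hglt
      rw [pvGetD_drop] at hmatch
      rw [pvExt, dif_pos ⟨by omega, hmatch⟩]
      exact ih (g + 1) (by omega) (by omega)

theorem pvExt_eq (r : List (List Int)) (p g : Nat) (hg : g ≤ pvLcp r (r.drop p)) :
    pvExt r r.length p g = pvLcp r (r.drop p) :=
  pvExt_eq_aux r p (pvLcp r (r.drop p)) g hg (by omega)

-- invariant of the Z loop before processing index p0
def pvZInv (r : List (List Int)) (st : List Nat × Nat × Nat) (p0 : Nat) : Prop :=
  st.1.length = r.length ∧
  (∀ q, 1 ≤ q → q < p0 → st.1.getD q 0 = pvLcp r (r.drop q)) ∧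
  (∀ q, p0 ≤ q → st.1.getD q 0 = 0) ∧
  st.2.1 < p0 ∧ st.2.2 ≤ r.length ∧
  (∀ u, st.2.1 + u < st.2.2 → r.getD (st.2.1 + u) [] = r.getD u [])

theorem pvZStep_inv (r : List (List Int)) (st : List Nat × Nat × Nat) (p : Nat)
    (hp1 : 1 ≤ p) (hpn : p < r.length) (hinv : pvZInv r st p) :
    pvZInv r (pvZStep r r.length st p) (p + 1) := by
  obtain ⟨hlen, hcorr, hzero, hl, hrn, hwin⟩ := hinv
  -- the starting guess is a sound lower bound on the lcp at shift p
  have hg0 : ∀ u, u < (if p < st.2.2 then min (st.2.2 - p) (st.1.getD (p - st.2.1) 0) else 0) →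
      r.getD u [] = r.getD (p + u) [] := by
    intro u hu
    split_ifs at hu with hpr
    · by_cases hl0 : st.2.1 = 0
      · have h0 : st.1.getD (p - st.2.1) 0 = 0 := by
          rw [hl0]; exact hzero (p - 0) (by omega)
        omega
      · have hzpl : st.1.getD (p - st.2.1) 0 = pvLcp r (r.drop (p - st.2.1)) :=
          hcorr (p - st.2.1) (by omega) (by omega)
        rw [hzpl] at hu
        have h1 : r.getD u [] = r.getD ((p - st.2.1) + u) [] := by
          have := pvLcp_match r (r.drop (p - st.2.1)) u (by omega)
          rwa [pvGetD_drop] at this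
        have h2 : r.getD (st.2.1 + ((p - st.2.1) + u)) [] = r.getD ((p - st.2.1) + u) [] :=
          hwin ((p - st.2.1) + u) (by omega)
        have he : st.2.1 + ((p - st.2.1) + u) = p + u := by omega
        rw [he] at h2
        rw [h1, h2]
    · omega
  have hg0le : (if p < st.2.2 then min (st.2.2 - p) (st.1.getD (p - st.2.1) 0) else 0)
      ≤ pvLcp r (r.drop p) := by
    apply pvLcp_ge
    · split_ifs <;> omega
    · rw [List.length_drop]; split_ifs <;> omega
    · intro u hu
      rw [pvGetD_drop]
      exact hg0 u hu
  have hext : pvExt r r.length p (if p < st.2.2 then min (st.2.2 - p) (st.1.getD (p - st.2.1) 0) else 0)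
      = pvLcp r (r.drop p) := pvExt_eq r p _ hg0le
  have hlcpn : pvLcp r (r.drop p) ≤ r.length - p := by
    have := pvLcp_le_right r (r.drop p)
    rwa [List.length_drop] at this
  have hsetlen : (st.1.set p (pvLcp r (r.drop p))).length = r.length := by
    rw [List.length_set]; exact hlen
  have hset_self : (st.1.set p (pvLcp r (r.drop p))).getD p 0 = pvLcp r (r.drop p) := by
    rw [List.getD_eq_getElem?_getD, List.getElem?_set_self (by omega)]
    simp
  have hset_other : ∀ q, q ≠ p → (st.1.set p (pvLcp r (r.drop p))).getD q 0 = st.1.getD q 0 := by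
    intro q hq
    rw [List.getD_eq_getElem?_getD, List.getElem?_set_ne (by omega), ← List.getD_eq_getElem?_getD]
  have hz1 : ∀ q, 1 ≤ q → q < p + 1 →
      (st.1.set p (pvLcp r (r.drop p))).getD q 0 = pvLcp r (r.drop q) := by
    intro q h1 h2
    by_cases hqp : q = p
    · subst hqp; exact hset_self
    · rw [hset_other q hqp]; exact hcorr q h1 (by omega)
  have hz2 : ∀ q, p + 1 ≤ q → (st.1.set p (pvLcp r (r.drop p))).getD q 0 = 0 := by
    intro q h1
    rw [hset_other q (by omega)]; exact hzero q (by omega)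
  have hwin' : ∀ u, p + u < p + pvLcp r (r.drop p) → r.getD (p + u) [] = r.getD u [] := by
    intro u hu
    have := pvLcp_match r (r.drop p) u (by omega)
    rw [pvGetD_drop] at this
    exact this.symm
  simp only [pvZStep]
  rw [hext]
  split_ifs with hbig
  · exact ⟨hsetlen, hz1, hz2, (show p < p + 1 by omega),
      (show p + pvLcp r (r.drop p) ≤ r.length by omega), hwin'⟩
  · exact ⟨hsetlen, hz1, hz2, (show st.2.1 < p + 1 by omega), hrn, hwin⟩

theorem pvZFold_inv (r : List (List Int)) :
    ∀ cnt p0 st, 1 ≤ p0 → p0 + cnt ≤ r.length → pvZInv r st p0 →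
      pvZInv r ((List.range' p0 cnt).foldl (pvZStep r r.length) st) (p0 + cnt) := by
  intro cnt
  induction cnt with
  | zero => intro p0 st _ _ h; simpa using h
  | succ cnt ih =>
    intro p0 st h1 h2 h
    rw [List.range'_succ, List.foldl_cons]
    have := ih (p0 + 1) (pvZStep r r.length st p0) (by omega) (by omega)
      (pvZStep_inv r st p0 h1 (by omega) h)
    have he : p0 + 1 + cnt = p0 + (cnt + 1) := by omega
    rwa [he] at this

-- the Z-array is correct: entry q (1 ≤ q < n) is the lcp of r with its shift by q
theorem pvZArr_correct (r : List (List Int)) (q : Nat) (h1 : 1 ≤ q) (h2 : q < r.length) :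
    (pvZArr r r.length).getD q 0 = pvLcp r (r.drop q) := by
  have hn : r.length ≠ 0 := by omega
  unfold pvZArr
  rw [if_neg hn]
  have hinit : pvZInv r ((List.replicate r.length 0).set 0 r.length, 0, 0) 1 := by
    refine ⟨by simp, fun q h1' h2' => absurd h2' (by omega), ?_,
      (show 0 < 1 by omega), (show 0 ≤ r.length by omega),
      fun u hu => absurd (show 0 + u < 0 from hu) (by omega)⟩
    intro q' hq'
    rw [List.getD_eq_getElem?_getD, List.getElem?_set_ne (by omega), List.getElem?_replicate]
    split_ifs <;> rfl
  have := pvZFold_inv r (r.length - 1) 1 _ (by omega) (by omega) hinit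
  obtain ⟨_, hcorr, _⟩ := this
  exact hcorr q h1 (by omega)

-- A's inner loop stops at the first mismatch, so it decides the forall over its range
theorem pvACheck_iff (keys : List (List Int)) (j p : Int) (ts : List Int) :
    pvACheck keys j p ts = true ↔
      ∀ t ∈ ts, PySem.List.pyGetD keys t [] = PySem.List.pyGetD keys (j + PySem.Int.mod (t - j) p) [] := by
  induction ts with
  | nil => simp [pvACheck]
  | cons t ts ih =>
    by_cases he : PySem.List.pyGetD keys t [] = PySem.List.pyGetD keys (j + PySem.Int.mod (t - j) p) []
    · simp [pvACheck, he, ih]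
    · simp [pvACheck, he]

-- periodicity via wrapped (mod) indices vs periodicity via a shift by p
theorem pvModShiftIff {α : Type} (g : Nat → α) (J P N : Nat) (hP : 0 < P) :
    (∀ T, J + P ≤ T → T < N → g T = g (J + (T - J) % P)) ↔
      (∀ T, J + P ≤ T → T < N → g T = g (T - P)) := by
  constructor
  · intro h T hT1 hT2
    by_cases hc : T < J + 2 * P
    · have hm : (T - J) % P = T - J - P := by
        rw [Nat.mod_eq_sub_mod (by omega)]
        exact Nat.mod_eq_of_lt (by omega)
      have := h T hT1 hT2
      rw [hm] at this
      rw [this]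
      congr 1
      omega
    · have h1 := h T hT1 hT2
      have h2 := h (T - P) (by omega) (by omega)
      rw [h1, h2]
      congr 1
      have : (T - P - J) % P = (T - J) % P := by
        conv_rhs => rw [Nat.mod_eq_sub_mod (by omega)]
        congr 1
        omega
      rw [this]
  · intro h T
    induction T using Nat.strong_induction_on with
    | _ T ih =>
      intro hT1 hT2
      by_cases hc : T < J + 2 * P
      · have hm : (T - J) % P = T - J - P := by
          rw [Nat.mod_eq_sub_mod (by omega)]
          exact Nat.mod_eq_of_lt (by omega)
        rw [h T hT1 hT2, hm]
        congr 1
        omega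
      · have h1 := h T hT1 hT2
        have h2 := ih (T - P) (by omega) (by omega) (by omega)
        rw [h1, h2]
        congr 1
        have : (T - P - J) % P = (T - J) % P := by
          conv_rhs => rw [Nat.mod_eq_sub_mod (by omega)]
          congr 1
          omega
        rw [this]

-- A's check equals the shifted-match condition over Nat indices
theorem pvACheck_shift (keys : List (List Int)) (J I : Nat) (hJI : J < I) (hIN : I < keys.length) :
    (pvACheck keys (J : Int) ((I : Int) - (J : Int)) (PySem.List.pyRange (I : Int) (keys.length : Int) 1) = true)
      ↔ (∀ T : Nat, I ≤ T → T < keys.length → keys.getD T [] = keys.getD (T - (I - J)) []) := by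
  set N := keys.length with hN
  have hL : (pvACheck keys (J : Int) ((I : Int) - (J : Int)) (PySem.List.pyRange (I : Int) (N : Int) 1) = true)
      ↔ (∀ T : Nat, I ≤ T → T < N → keys.getD T [] = keys.getD (J + (T - J) % (I - J)) []) := by
    rw [pvACheck_iff]
    constructor
    · intro h T hT1 hT2
      have hm := h (T : Int) (PySem.List.mem_pyRange_one.mpr (by omega))
      have e2 : ((I : Int) - (J : Int)) = ((I - J : Nat) : Int) := by omega
      have e1 : ((T : Int) - (J : Int)) = ((T - J : Nat) : Int) := by omega
      rw [PySem.Int.mod_eq_emod_of_pos (by omega), e1, e2] at hm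
      have hcast : (J : Int) + ((T - J : Nat) : Int) % ((I - J : Nat) : Int) = ((J + (T - J) % (I - J) : Nat) : Int) := by
        push_cast; ring
      rw [hcast] at hm
      have hb1 : J + (T - J) % (I - J) < N := by
        have := Nat.mod_lt (T - J) (y := I - J) (by omega)
        omega
      rw [PySem.List.pyGetD_eq_getElem keys [] (by omega) (by omega),
          PySem.List.pyGetD_eq_getElem keys [] (by omega) (by omega)] at hm
      simp only [Int.toNat_natCast] at hm
      simp only [List.getD_eq_getElem?_getD,
        List.getElem?_eq_getElem (show T < keys.length by omega),
        List.getElem?_eq_getElem (show J + (T - J) % (I - J) < keys.length by omega),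
        Option.getD_some]
      exact hm
    · intro h t ht
      rw [PySem.List.mem_pyRange_one] at ht
      obtain ⟨h1, h2⟩ := ht
      have h0 : 0 ≤ t := by omega
      have hte : t = ((t.toNat : Nat) : Int) := (Int.toNat_of_nonneg h0).symm
      set T := t.toNat with hT
      have hT1 : I ≤ T := by omega
      have hT2 : T < N := by omega
      have hm := h T hT1 hT2
      rw [hte]
      have e2 : ((I : Int) - (J : Int)) = ((I - J : Nat) : Int) := by omega
      have e1 : ((T : Int) - (J : Int)) = ((T - J : Nat) : Int) := by omega
      rw [PySem.Int.mod_eq_emod_of_pos (by omega), e1, e2]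
      have hcast : (J : Int) + ((T - J : Nat) : Int) % ((I - J : Nat) : Int) = ((J + (T - J) % (I - J) : Nat) : Int) := by
        push_cast; ring
      rw [hcast]
      have hb1 : J + (T - J) % (I - J) < N := by
        have := Nat.mod_lt (T - J) (y := I - J) (by omega)
        omega
      rw [PySem.List.pyGetD_eq_getElem keys [] (by omega) (by omega),
          PySem.List.pyGetD_eq_getElem keys [] (by omega) (by omega)]
      simp only [List.getD_eq_getElem?_getD,
        List.getElem?_eq_getElem (show T < keys.length by omega),
        List.getElem?_eq_getElem (show J + (T - J) % (I - J) < keys.length by omega),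
        Option.getD_some] at hm
      simpa using hm
  rw [hL]
  have key := pvModShiftIff (fun T => keys.getD T ([] : List Int)) J (I - J) N (by omega)
  constructor
  · intro h T h1 h2
    exact key.mp (fun T h1 h2 => h T (by omega) h2) T (by omega) h2
  · intro h T h1 h2
    exact key.mpr (fun T h1 h2 => h T (by omega) h2) T (by omega) h2

-- getD through reversal
theorem pvGetD_reverse (keys : List (List Int)) (u : Nat) (hu : u < keys.length) :
    keys.reverse.getD u [] = keys.getD (keys.length - 1 - u) [] := by
  rw [List.getD_eq_getElem?_getD, List.getD_eq_getElem?_getD, List.getElem?_reverse hu]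

-- A's verification at a repeat equals the Z-array test of B
theorem pvBridge (keys : List (List Int)) (J I : Nat) (hJI : J < I) (hIN : I < keys.length) :
    (pvACheck keys (J : Int) ((I : Int) - (J : Int)) (PySem.List.pyRange (I : Int) (keys.length : Int) 1) = true)
      ↔ keys.length - I ≤ (pvZArr keys.reverse keys.length).getD (I - J) 0 := by
  set N := keys.length with hN
  set P := I - J with hP
  set r := keys.reverse with hr
  have hrlen : r.length = N := by rw [hr, List.length_reverse]
  have hz : (pvZArr r N).getD P 0 = pvLcp r (r.drop P) := by
    have := pvZArr_correct r P (by omega) (by omega)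
    rwa [hrlen] at this
  rw [pvACheck_shift keys J I hJI hIN, hz]
  -- shifted condition on keys ⟺ prefix-match condition on r
  have hiff : (∀ T : Nat, I ≤ T → T < N → keys.getD T [] = keys.getD (T - P) [])
      ↔ (∀ u : Nat, u < N - I → r.getD u [] = r.getD (u + P) []) := by
    constructor
    · intro h u hu
      have hT := h (N - 1 - u) (by omega) (by omega)
      rw [pvGetD_reverse keys u (by omega), pvGetD_reverse keys (u + P) (by omega)]
      have e2 : keys.length - 1 - (u + P) = (N - 1 - u) - P := by omega
      have e1 : keys.length - 1 - u = N - 1 - u := by omega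
      rw [e1, e2]
      exact hT
    · intro h T hT1 hT2
      have hu := h (N - 1 - T) (by omega)
      rw [pvGetD_reverse keys (N - 1 - T) (by omega),
          pvGetD_reverse keys ((N - 1 - T) + P) (by omega)] at hu
      have e1 : keys.length - 1 - (N - 1 - T) = T := by omega
      have e2 : keys.length - 1 - ((N - 1 - T) + P) = T - P := by omega
      rw [e1, e2] at hu
      exact hu
  rw [hiff]
  constructor
  · intro h
    apply pvLcp_ge
    · rw [hrlen]; omega
    · rw [List.length_drop, hrlen]; omega
    · intro u hu
      rw [pvGetD_drop]
      have := h u hu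
      rwa [Nat.add_comm u P] at this
  · intro h u hu
    have := pvLcp_match r (r.drop P) u (by omega)
    rw [pvGetD_drop] at this
    rwa [Nat.add_comm P u] at this

-- main loop equivalence: both loops grow the same dict; at each repeat the tests agree
theorem pvLoopEq (keys ks : List (List Int)) (m : Nat) (seen : PySem.Dict (List Int) Int)
    (hdrop : keys.drop m = ks)
    (hseen : ∀ k j, seen.get? k = some j → ∃ J : Nat, j = (J : Int) ∧ J < m) :
    pvALoop keys (PySem.List.enumerate ks (m : Int)) seen
      = pvBScan (keys.length : Int) (pvZArr keys.reverse keys.length)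
          (PySem.List.enumerate ks (m : Int)) seen := by
  induction ks generalizing m seen with
  | nil => simp [PySem.List.enumerate, pvALoop, pvBScan]
  | cons k ks' ih =>
    have hm : m < keys.length := by
      by_contra hc
      rw [List.drop_eq_nil_of_le (by omega)] at hdrop
      exact (List.cons_ne_nil _ _) hdrop.symm
    have hdrop' : keys.drop (m + 1) = ks' := by
      have : keys.drop (m + 1) = (keys.drop m).drop 1 := by rw [List.drop_drop]
      rw [this, hdrop]; rfl
    rw [PySem.List.enumerate_cons]
    have hstep : ((m : Int) + 1) = (((m + 1 : Nat)) : Int) := by push_cast; ring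
    cases hsk : seen.get? k with
    | none =>
      simp only [pvALoop, pvBScan, hsk]
      rw [hstep]
      apply ih (m + 1) _ hdrop'
      intro k' j hj
      by_cases hk : k' = k
      · subst hk
        rw [PySem.Dict.get?_insert_self] at hj
        exact ⟨m, by injection hj with h; omega, by omega⟩
      · rw [PySem.Dict.get?_insert_of_ne seen (m : Int) hk] at hj
        obtain ⟨J, h1, h2⟩ := hseen k' j hj
        exact ⟨J, h1, by omega⟩
    | some j =>
      obtain ⟨J, hjJ, hJm⟩ := hseen k j hsk
      subst hjJ
      have hp : ¬ ((m : Int) - (J : Int) ≤ 0) := by omega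
      have htn : ((m : Int) - (J : Int)).toNat = m - J := by omega
      have hbr := pvBridge keys J m hJm hm
      simp only [pvALoop, pvBScan, hsk]
      rw [if_neg hp, htn]
      have hcond : (pvACheck keys (J : Int) ((m : Int) - (J : Int)) (PySem.List.pyRange (m : Int) (keys.length : Int) 1) = true)
          ↔ (((pvZArr keys.reverse keys.length).getD (m - J) 0 : Int) ≥ (keys.length : Int) - (m : Int)) := by
        rw [hbr]
        omega
      by_cases hchk : pvACheck keys (J : Int) ((m : Int) - (J : Int)) (PySem.List.pyRange (m : Int) (keys.length : Int) 1) = true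
      · rw [if_pos hchk, if_pos (hcond.mp hchk)]
      · rw [if_neg hchk, if_neg (fun hc => hchk (hcond.mpr hc))]
        rw [hstep]
        exact ih (m + 1) seen hdrop' (fun k' j hj => by
          obtain ⟨J', h1, h2⟩ := hseen k' j hj
          exact ⟨J', h1, by omega⟩)

-- ===== VERDICT (by name: the statement is the Claim_ definition above) =====
theorem detect_period_spec : Claim_equal_detect_period := by
  intro keys _
  unfold Spec_detect_period detect_period detect_period_alt
  have h := pvLoopEq keys keys 0 PySem.Dict.empty (by simp)
    (by intro k j hj; rw [PySem.Dict.get?_empty] at hj; exact absurd hj (by simp))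
  simpa using h
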